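-- pv_equiv track=rewrite | github.com/Balut-moko/procon-grassmaker-archive | atcoder/abc138/abc138_e/47389760.py | calc_next
-- ===== SOURCE A (Python) =====
-- def calc_next(S):
--     N = len(S)
--     nex = [[N] * 26 for _ in range(N + 1)]
--     for i in range(N - 1, -1, -1):
--         for j in range(26):
--             nex[i][j] = nex[i + 1][j]
--         nex[i][ord(S[i]) - ord("a")] = i
--     return nex
-- ===== SOURCE B (Python) =====
-- def calc_next(S):
--     N = len(S)
--     cols = []
--     for j in range(26):
--         col = [N] * (N + 1)
--         nxt = N
--         for i in range(N - 1, -1, -1):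
--             if ord(S[i]) - ord("a") == j:
--                 nxt = i
--             col[i] = nxt
--         cols.append(col)
--     return [[cols[j][i] for j in range(26)] for i in range(N + 1)]
-- ===== Notes on version B (the rewrite author's own statement) =====
-- stated objective: alternative
-- what changed: B builds the table column by column, one per letter, maintaining a single running next-pointer per letter during a descending sweep and transposing at the end, instead of A's row-by-row construction that copies the entire 26-entry previous row at every position.
-- intended difference: On strings containing a character with code 71-96 ('G'..'`'), A's negative index ord(c)-97 wraps around and stamps the position into the column of an unrelated lowercase letter, while B records only real occurrences of each lowercase letter and ignores such characters, which is the intended next-occurrence table. — e.g. on calc_next("G"): A returns [[0, 1, 1, 1, 1, 1, 1, 1, 1, 1, 1, 1, 1, 1, 1, 1, 1, 1, 1, 1, 1, 1, 1, 1, 1, 1], [1, 1, 1, 1, 1, 1, 1, 1, 1, 1, 1, 1, 1…, B returns [[1, 1, 1, 1, 1, 1, 1, 1, 1, 1, 1, 1, 1, 1, 1, 1, 1, 1, 1, 1, 1, 1, 1, 1, 1, 1], [1, 1, 1, 1, 1, 1, 1, 1, 1, 1, 1, 1, 1…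
import Mathlib
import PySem

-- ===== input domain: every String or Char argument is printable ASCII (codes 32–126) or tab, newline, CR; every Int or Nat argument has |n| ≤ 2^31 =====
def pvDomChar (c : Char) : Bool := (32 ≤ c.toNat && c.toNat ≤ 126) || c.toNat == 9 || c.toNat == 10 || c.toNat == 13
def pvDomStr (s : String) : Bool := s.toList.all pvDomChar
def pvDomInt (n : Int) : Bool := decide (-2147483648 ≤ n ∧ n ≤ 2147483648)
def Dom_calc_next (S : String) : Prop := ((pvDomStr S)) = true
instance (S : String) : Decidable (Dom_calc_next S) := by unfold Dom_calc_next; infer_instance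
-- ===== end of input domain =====

-- B builds the table column by column (one running next-pointer per letter, then a transpose)
-- instead of A's row-by-row copy of the previous full row: an alternative decomposition, same cost.

-- ===== PORT A =====
-- one step of A's outer loop at index i: the inner j-loop copies row i+1 into row i,
-- then nex[i][ord(S[i])-97] = i (pySetD: Python negative-index semantics, exact for -26 ≤ idx < 26;
-- Pre_ keeps every index in that range, where Python would not raise)
def pvStepA (cs : List Char) (i : Nat) (nex : List (List Int)) : List (List Int) :=
  let copied := nex.set i (nex.getD (i + 1) [])
  copied.set i
    (PySem.List.pySetD (copied.getD i []) (((cs.getD i 'a').toNat : Int) - 97) (i : Int))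

-- 'for i in range(N-1, -1, -1)': descending counter recursion; pvLoopA cs k runs indices k-1, …, 0
def pvLoopA (cs : List Char) : Nat → List (List Int) → List (List Int)
  | 0, nex => nex
  | k + 1, nex => pvLoopA cs k (pvStepA cs k nex)

def calc_next (S : String) : List (List Int) :=
  let cs := S.toList
  let N := cs.length
  pvLoopA cs N (List.replicate (N + 1) (List.replicate 26 (N : Int)))

-- ===== PORT B =====
-- one column (letter j): the scalar 'nxt' sweep, i descending; col[i] = i if S[i] matches j, else col[i+1]
def pvColB (j N : Nat) : List Char → Nat → List Int
  | [], _ => [(N : Int)]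
  | c :: rest, i =>
    let tail := pvColB j N rest (i + 1)
    (if ((c.toNat : Int) - 97) = (j : Nat) then (i : Int) else tail.headD 0) :: tail

def calc_next_alt (S : String) : List (List Int) :=
  let cs := S.toList
  let N := cs.length
  let cols := (List.range 26).map (fun j => pvColB j N cs 0)
  (List.range (N + 1)).map (fun i => (List.range 26).map (fun j => (cols.getD j []).getD i 0))

-- ===== PRECONDITION & SPEC =====
-- Pre_ is exactly the set of inputs on which A returns: a character with code < 71 or > 122 makes
-- ord(c)-97 fall outside [-26, 25] and A's row assignment raise IndexError.
def Pre_calc_next (S : String) : Prop :=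
  (S.toList.all (fun c => 71 ≤ c.toNat && c.toNat ≤ 122)) = true
instance (S : String) : Decidable (Pre_calc_next S) := by unfold Pre_calc_next; infer_instance
def pvWitness_calc_next : String := "abc"

-- On strings containing a character in codes 71–96 ('G'–'`'), A's negative index ord(c)-97 wraps
-- around and stamps position i into the column of an unrelated lowercase letter, while B's intended
-- table simply ignores non-lowercase characters, recording only real occurrences of each letter.
def D_calc_next (S : String) : Prop :=
  (S.toList.any (fun c => 71 ≤ c.toNat && c.toNat ≤ 96)) = true
instance (S : String) : Decidable (D_calc_next S) := by unfold D_calc_next; infer_instance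

def Spec_calc_next (S : String) (out : List (List Int)) : Prop :=
  ¬ D_calc_next S → out = calc_next_alt S
instance (S : String) (out : List (List Int)) : Decidable (Spec_calc_next S out) := by
  unfold Spec_calc_next; infer_instance

def pvDiffWitness_calc_next : String := "G"
def pvDiffWitnessOut_calc_next : (List (List Int)) × (List (List Int)) :=
  ([[0, 1, 1, 1, 1, 1, 1, 1, 1, 1, 1, 1, 1, 1, 1, 1, 1, 1, 1, 1, 1, 1, 1, 1, 1, 1],
    [1, 1, 1, 1, 1, 1, 1, 1, 1, 1, 1, 1, 1, 1, 1, 1, 1, 1, 1, 1, 1, 1, 1, 1, 1, 1]],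
   [[1, 1, 1, 1, 1, 1, 1, 1, 1, 1, 1, 1, 1, 1, 1, 1, 1, 1, 1, 1, 1, 1, 1, 1, 1, 1],
    [1, 1, 1, 1, 1, 1, 1, 1, 1, 1, 1, 1, 1, 1, 1, 1, 1, 1, 1, 1, 1, 1, 1, 1, 1, 1]])

-- ===== CLAIM (what is proved, stated in full; the proofs are below) =====
def Claim_unchanged_calc_next : Prop :=
  ∀ (S : String), Dom_calc_next S → Pre_calc_next S → Spec_calc_next S (calc_next S)
def Claim_changed_calc_next : Prop :=
  Dom_calc_next (pvDiffWitness_calc_next) ∧ Pre_calc_next (pvDiffWitness_calc_next) ∧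
  D_calc_next (pvDiffWitness_calc_next) ∧
  calc_next (pvDiffWitness_calc_next) = pvDiffWitnessOut_calc_next.1 ∧
  calc_next_alt (pvDiffWitness_calc_next) = pvDiffWitnessOut_calc_next.2 ∧
  pvDiffWitnessOut_calc_next.1 ≠ pvDiffWitnessOut_calc_next.2
def Claim_exact_calc_next : Prop :=
  ∀ (S : String), Dom_calc_next S → Pre_calc_next S → D_calc_next S →
    calc_next S ≠ calc_next_alt S

-- ===== LEMMAS AND PROOFS =====

-- next occurrence of letter j at or after position i in suffix t (positions i, i+1, …), else N
def pvNxt (j N : Nat) : List Char → Nat → Int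
  | [], _ => (N : Int)
  | c :: r, i => if ((c.toNat : Int) - 97) = (j : Nat) then (i : Int) else pvNxt j N r (i + 1)

-- canonical suffix table: rows i, i+1, …, i+|t| of A's table (wraparound included via pySetD)
def pvRows (N : Nat) : List Char → Nat → List (List Int)
  | [], _ => [List.replicate 26 (N : Int)]
  | c :: r, i =>
    PySem.List.pySetD ((pvRows N r (i + 1)).headD []) (((c.toNat : Int)) - 97) (i : Int)
      :: pvRows N r (i + 1)

theorem pvRows_length (N : Nat) (t : List Char) (i : Nat) :
    (pvRows N t i).length = t.length + 1 := by
  induction t generalizing i with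
  | nil => simp [pvRows]
  | cons c r ih => simp [pvRows, ih]

theorem pvRows_ne_nil (N : Nat) (t : List Char) (i : Nat) : pvRows N t i ≠ [] := by
  intro h
  have := pvRows_length N t i
  simp [h] at this

-- every row of pvRows has 26 entries
theorem pvRows_row_length (N : Nat) (t : List Char) (i : Nat) :
    ∀ row ∈ pvRows N t i, row.length = 26 := by
  induction t generalizing i with
  | nil => intro row h; simp [pvRows] at h; simp [h]
  | cons c r ih =>
    intro row h
    simp only [pvRows, List.mem_cons] at h
    rcases h with h | h
    · subst h
      rw [PySem.List.length_pySetD]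
      have : (pvRows N r (i + 1)).headD [] ∈ pvRows N r (i + 1) := by
        cases hn : pvRows N r (i + 1) with
        | nil => exact absurd hn (pvRows_ne_nil N r (i + 1))
        | cons a l => simp
      exact ih (i + 1) _ this
    · exact ih (i + 1) row h

-- A's loop invariant: running the loop on a table whose rows ≥ k are already final yields the full table
theorem pvLoopA_invariant (cs : List Char) (k : Nat) (hk : k ≤ cs.length) :
    pvLoopA cs k
      (List.replicate k (List.replicate 26 (cs.length : Int)) ++ pvRows cs.length (cs.drop k) k)
      = pvRows cs.length cs 0 := by
  induction k with
  | zero => simp [pvLoopA]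
  | succ k ih =>
    have hk' : k ≤ cs.length := Nat.le_of_succ_le hk
    have hklt : k < cs.length := hk
    rw [pvLoopA]
    have hstep :
        pvStepA cs k
          (List.replicate (k + 1) (List.replicate 26 (cs.length : Int)) ++
            pvRows cs.length (cs.drop (k + 1)) (k + 1))
          = List.replicate k (List.replicate 26 (cs.length : Int)) ++
            pvRows cs.length (cs.drop k) k := by
      have hdrop : cs.drop k = cs[k] :: cs.drop (k + 1) := List.drop_eq_getElem_cons hklt
      have hrep : List.replicate (k + 1) (List.replicate 26 (cs.length : Int)) =
          List.replicate k (List.replicate 26 (cs.length : Int)) ++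
            [List.replicate 26 (cs.length : Int)] := by
        rw [List.replicate_succ']
      unfold pvStepA
      rw [hrep, List.append_assoc]
      rw [List.getD_eq_getElem?_getD, List.getElem?_append_right (by simp),
          List.length_replicate]
      simp only [Nat.add_sub_cancel_left]
      rw [List.set_set]
      rw [List.set_append_right _ _ (by simp)]
      simp only [List.length_replicate, Nat.sub_self]
      have hget : cs.getD k 'a' = cs[k] := List.getD_eq_getElem cs 'a' hklt
      rw [hdrop]
      simp only [pvRows]
      congr 1
      simp only [List.singleton_append, List.set_cons_zero]
      congr 2
      · cases hn : pvRows cs.length (cs.drop (k + 1)) (k + 1) with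
        | nil => exact absurd hn (pvRows_ne_nil _ _ _)
        | cons a l => simp
      · rw [hget]
    rw [hstep]
    exact ih hk'

theorem calc_next_eq_pvRows (S : String) :
    calc_next S = pvRows S.toList.length S.toList 0 := by
  have h := pvLoopA_invariant S.toList S.toList.length (le_refl _)
  rw [List.drop_length] at h
  show pvLoopA S.toList S.toList.length
      (List.replicate (S.toList.length + 1) (List.replicate 26 (S.toList.length : Int)))
      = pvRows S.toList.length S.toList 0
  rw [List.replicate_succ']
  exact h

-- B's column: head characterisation
theorem pvColB_headD (j N : Nat) (t : List Char) (i : Nat) :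
    (pvColB j N t i).headD 0 = pvNxt j N t i := by
  induction t generalizing i with
  | nil => simp [pvColB, pvNxt]
  | cons c r ih => simp only [pvColB, pvNxt, List.headD_cons]; rw [ih]

-- B's column: entry m is the next pointer for the suffix starting at position i+m
theorem pvColB_getD (j N : Nat) (t : List Char) (i m : Nat) (hm : m ≤ t.length) :
    (pvColB j N t i).getD m 0 = pvNxt j N (t.drop m) (i + m) := by
  induction t generalizing i m with
  | nil =>
    obtain rfl : m = 0 := Nat.le_zero.mp hm
    simp [pvColB, pvNxt]
  | cons c r ih =>
    cases m with
    | zero =>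
      simp only [List.drop_zero, Nat.add_zero]
      rw [← pvColB_headD j N (c :: r) i]
      cases hn : pvColB j N (c :: r) i with
      | nil => simp [pvColB] at hn
      | cons a l => simp
    | succ m =>
      simp only [pvColB, List.getD_cons_succ, List.drop_succ_cons]
      rw [ih (i + 1) m (by simpa using hm)]
      ring_nf

-- pvNxt never points before position i (when the suffix really ends at N)
theorem pvNxt_ge (j N : Nat) (t : List Char) (i : Nat) (h : i + t.length = N) :
    (i : Int) ≤ pvNxt j N t i := by
  induction t generalizing i with
  | nil => simp at h; simp [pvNxt, h]
  | cons c r ih =>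
    simp only [pvNxt]
    split
    · exact le_refl _
    · have := ih (i + 1) (by simp at h ⊢; omega)
      push_cast at this ⊢
      omega

-- map over range 26, updated at k < 26, is the map of the pointwise-updated function
theorem map_range_set (f : Nat → Int) (k : Nat) (_hk : k < 26) (v : Int) :
    ((List.range 26).map f).set k v =
      (List.range 26).map (fun j => if j = k then v else f j) := by
  apply List.ext_getElem
  · simp
  · intro n h1 h2
    simp only [List.length_set, List.length_map, List.length_range] at h1
    rw [List.getElem_set]
    simp only [List.getElem_map, List.getElem_range]
    split
    · simp [*]
    · rw [if_neg (by omega)]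

theorem map_range_succ_cons {α : Type} (n : Nat) (f : Nat → α) :
    (List.range (n + 1)).map f = f 0 :: (List.range n).map (fun m => f (m + 1)) := by
  rw [List.range_succ_eq_map, List.map_cons, List.map_map]
  rfl

-- rows characterisation on lowercase suffixes
theorem pvRows_lower (N : Nat) (t : List Char) (i : Nat)
    (hlow : ∀ c ∈ t, 97 ≤ c.toNat ∧ c.toNat ≤ 122) :
    pvRows N t i =
      (List.range (t.length + 1)).map
        (fun m => (List.range 26).map (fun j => pvNxt j N (t.drop m) (i + m))) := by
  induction t generalizing i with
  | nil =>
    show [List.replicate 26 (N : Int)] = _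
    simp [pvNxt, List.map_const']
  | cons c r ih =>
    have hc := hlow c (by simp)
    have hr : ∀ c' ∈ r, 97 ≤ c'.toNat ∧ c'.toNat ≤ 122 := fun c' h => hlow c' (by simp [h])
    simp only [pvRows, List.length_cons]
    rw [ih (i + 1) hr]
    rw [map_range_succ_cons (r.length + 1)]
    congr 1
    · -- head row
      rw [map_range_succ_cons r.length, List.headD_cons]
      have hk : (((c.toNat : Int)) - 97) = (((c.toNat - 97 : Nat) : Int)) := by
        have := hc.1; omega
      rw [hk, PySem.List.pySetD_natCast]
      rw [map_range_set _ (c.toNat - 97) (by omega)]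
      apply List.map_congr_left
      intro j hj
      simp only [List.drop_zero, Nat.add_zero, pvNxt]
      by_cases hjc : j = c.toNat - 97
      · rw [if_pos hjc, if_pos (by push_cast [hjc]; omega)]
      · rw [if_neg hjc, if_neg (by intro hcon; apply hjc; omega)]
    · -- tail rows
      apply List.map_congr_left
      intro m hm
      simp only [List.drop_succ_cons]
      congr 1
      funext j
      congr 1
      omega

-- B's output in the same canonical form
theorem calc_next_alt_eq (S : String) :
    calc_next_alt S =
      (List.range (S.toList.length + 1)).map
        (fun m => (List.range 26).map
          (fun j => pvNxt j S.toList.length (S.toList.drop m) m)) := by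
  unfold calc_next_alt
  apply List.map_congr_left
  intro m hm
  simp only [List.mem_range] at hm
  apply List.map_congr_left
  intro j hj
  simp only [List.mem_range] at hj
  have hcols : ((List.range 26).map (fun j' => pvColB j' S.toList.length S.toList 0)).getD j []
      = pvColB j S.toList.length S.toList 0 := by
    rw [List.getD_eq_getElem?_getD, List.getElem?_map, List.getElem?_range hj]
    rfl
  rw [hcols, pvColB_getD j S.toList.length S.toList 0 m (by omega)]
  simp

-- pvRows row extraction: row m is the head row of the suffix table from position i+m
theorem pvRows_getD (N : Nat) (t : List Char) (i m : Nat) (hm : m ≤ t.length) :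
    (pvRows N t i).getD m [] = (pvRows N (t.drop m) (i + m)).headD [] := by
  induction t generalizing i m with
  | nil =>
    obtain rfl : m = 0 := Nat.le_zero.mp hm
    rfl
  | cons c r ih =>
    cases m with
    | zero => simp [pvRows]
    | succ m =>
      simp only [pvRows, List.getD_cons_succ, List.drop_succ_cons]
      rw [ih (i + 1) m (by simpa using hm)]
      congr 2
      omega

-- pySetD at a negative in-range index on a 26-row writes at 26+idx
theorem pySetD_neg (row : List Int) (hlen : row.length = 26) (idx : Int)
    (h1 : -26 ≤ idx) (h2 : idx < 0) (v : Int) :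
    PySem.List.pySetD row idx v = row.set (26 + idx).toNat v := by
  unfold PySem.List.pySetD PySem.List.pySet? PySem.List.pyIdx?
  rw [if_neg (by omega), if_pos (by rw [hlen]; omega)]
  simp only [Option.map_some, Option.getD_some]
  congr 1
  omega

-- ===== VERDICT (by name: the statement is the Claim_ definition above) =====
theorem calc_next_spec : Claim_unchanged_calc_next := by
  intro S _ hpre
  unfold Spec_calc_next
  intro hnd
  unfold Pre_calc_next at hpre
  unfold D_calc_next at hnd
  simp only [List.all_eq_true, Bool.and_eq_true, decide_eq_true_eq] at hpre
  simp only [List.any_eq_true, Bool.and_eq_true, decide_eq_true_eq, not_exists, not_and] at hnd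
  have hlow : ∀ c ∈ S.toList, 97 ≤ c.toNat ∧ c.toNat ≤ 122 := by
    intro c hc
    have h1 := hpre c hc
    have h2 := hnd c hc
    omega
  rw [calc_next_eq_pvRows, calc_next_alt_eq, pvRows_lower _ _ _ hlow]
  apply List.map_congr_left
  intro m _
  congr 1
  funext j
  congr 1
  omega

set_option maxRecDepth 4096 in
theorem calc_next_changed : Claim_changed_calc_next := by
  unfold Claim_changed_calc_next
  refine ⟨?_, ?_, ?_, by rfl, by rfl, by decide⟩
  · unfold Dom_calc_next pvDomStr pvDiffWitness_calc_next
    rw [show ("G" : String).toList = ['G'] from rfl]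
    decide
  · unfold Pre_calc_next pvDiffWitness_calc_next
    rw [show ("G" : String).toList = ['G'] from rfl]
    decide
  · unfold D_calc_next pvDiffWitness_calc_next
    rw [show ("G" : String).toList = ['G'] from rfl]
    decide

theorem calc_next_tight : Claim_exact_calc_next := by
  intro S _ hpre hd heq
  unfold Pre_calc_next at hpre
  unfold D_calc_next at hd
  simp only [List.all_eq_true, Bool.and_eq_true, decide_eq_true_eq] at hpre
  simp only [List.any_eq_true, Bool.and_eq_true, decide_eq_true_eq] at hd
  obtain ⟨c, hmem, hc1, hc2⟩ := hd
  obtain ⟨k, hk, hck⟩ := List.getElem_of_mem hmem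
  set cs := S.toList
  set N := cs.length
  -- the wrapped column
  set j0 : Nat := c.toNat - 71 with hj0
  have hj0lt : j0 < 26 := by omega
  have hdrop : cs.drop k = c :: cs.drop (k + 1) := by
    rw [List.drop_eq_getElem_cons hk, hck]
  -- A's entry at (k, j0) is k
  have hArow : (pvRows N cs 0).getD k [] =
      PySem.List.pySetD ((pvRows N (cs.drop (k + 1)) (k + 1)).headD []) (((c.toNat : Int)) - 97)
        (k : Int) := by
    rw [pvRows_getD N cs 0 k (le_of_lt hk)]
    rw [hdrop]
    simp only [pvRows, List.headD_cons]
    norm_num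
  have hheadlen : ((pvRows N (cs.drop (k + 1)) (k + 1)).headD []).length = 26 := by
    apply pvRows_row_length
    cases hn : pvRows N (cs.drop (k + 1)) (k + 1) with
    | nil => exact absurd hn (pvRows_ne_nil _ _ _)
    | cons a l => simp
  have hA : ((pvRows N cs 0).getD k []).getD j0 0 = (k : Int) := by
    rw [hArow, pySetD_neg _ hheadlen _ (by omega) (by omega)]
    have hpos : (26 + ((c.toNat : Int) - 97)).toNat = j0 := by omega
    rw [hpos, List.getD_eq_getElem?_getD, List.getElem?_set_self (by omega)]
    simp
  -- B's entry at (k, j0) is > k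
  have hB : (k : Int) < ((calc_next_alt S).getD k []).getD j0 0 := by
    rw [calc_next_alt_eq]
    have houter :
        ((List.range (N + 1)).map
            (fun m => (List.range 26).map (fun j => pvNxt j N (cs.drop m) m))).getD k []
          = (List.range 26).map (fun j => pvNxt j N (cs.drop k) k) := by
      rw [List.getD_eq_getElem?_getD, List.getElem?_map,
        List.getElem?_range (by omega)]
      rfl
    rw [houter]
    have hinner : ((List.range 26).map (fun j => pvNxt j N (cs.drop k) k)).getD j0 0
        = pvNxt j0 N (cs.drop k) k := by
      rw [List.getD_eq_getElem?_getD, List.getElem?_map, List.getElem?_range hj0lt]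
      rfl
    rw [hinner, hdrop]
    simp only [pvNxt]
    rw [if_neg (by omega)]
    have := pvNxt_ge j0 N (cs.drop (k + 1)) (k + 1) (by simp [N]; omega)
    omega
  -- contradiction
  rw [calc_next_eq_pvRows] at heq
  rw [heq] at hA
  omega
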